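-- pv_equiv track=rewrite | github.com/FalseR20/FalseR_BANK | dj/mainapp/iban_func.py | control_iban
-- ===== SOURCE A (Python) =====
-- def control_iban(iban: str) -> int:
--     if iban[:2] != "BY":
--         return True
--     acc = iban[4:]
--     acc_numbers = ""
--     for char in acc:
--         num = ord(char)
--         acc_numbers += str(num - 55) if num >= 65 else char
--     control = 98 - (int(acc_numbers + "113400") % 97)
--     return control == int(iban[2:4])
-- ===== SOURCE B (Python) =====
-- def control_iban(iban: str) -> int:
--     if iban[:2] != "BY":
--         return True
--     rem = 0
--     for char in iban[4:]:
--         num = ord(char)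
--         piece = str(num - 55) if num >= 65 else char
--         for d in piece:
--             rem = (rem * 10 + int(d)) % 97
--     for d in "113400":
--         rem = (rem * 10 + int(d)) % 97
--     return 98 - rem == int(iban[2:4])
-- ===== Notes on version B (the rewrite author's own statement) =====
-- stated objective: alternative
-- what changed: B folds every produced digit into a running mod-97 remainder (incremental modular reduction) instead of concatenating one big digit string and reducing a single big integer modulo 97; B therefore also keeps returning on country-prefixed inputs whose digit expansion exceeds CPython's 4300-digit int() conversion limit, where A raises ValueError.
-- outside the precondition, e.g. on control_iban('BY00 '): A returns False, B raises ValueError; on control_iban('BY00+1'): A returns False, B raises ValueError; on control_iban('BY'): A raises ValueError, B raises ValueError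
import Mathlib
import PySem

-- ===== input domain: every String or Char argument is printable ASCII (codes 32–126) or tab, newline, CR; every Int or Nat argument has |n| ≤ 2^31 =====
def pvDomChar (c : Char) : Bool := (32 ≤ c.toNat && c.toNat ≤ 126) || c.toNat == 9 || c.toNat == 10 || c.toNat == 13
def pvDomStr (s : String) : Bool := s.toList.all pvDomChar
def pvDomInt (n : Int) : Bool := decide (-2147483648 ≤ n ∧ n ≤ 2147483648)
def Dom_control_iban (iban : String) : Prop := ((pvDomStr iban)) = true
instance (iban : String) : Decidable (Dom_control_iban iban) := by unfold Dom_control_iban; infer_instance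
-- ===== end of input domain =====

-- B replaces A's big concatenated digit string and single big-integer `int(...) % 97` by an
-- incremental mod-97 remainder folded over the digits one at a time (objective: alternative;
-- B also keeps returning where A hits CPython's 4300-digit int() limit).

-- ===== PORT A =====
-- string ops are ported on the code-point list (iban.toList), the PySem-defined semantics
-- `int(acc_numbers + "113400")` is hand-ported as a plain decimal digit fold: exact here because
-- Pre_ guarantees the argument is a nonempty string of ASCII digits of length ≤ 4300
def control_iban (iban : String) : Bool :=
  if PySem.List.slice iban.toList none (some 2) ≠ "BY".toList then true
  else
    let acc := PySem.List.slice iban.toList (some 4) none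
    let accNumbers := acc.foldl (fun (s : List Char) c =>
      s ++ (if 65 ≤ (c.toNat : Int) then PySem.Int.toChars ((c.toNat : Int) - 55) else [c])) []
    let control : Int := 98 - PySem.Int.mod
      ((accNumbers ++ "113400".toList).foldl (fun v c => v * 10 + ((c.toNat : Int) - 48)) 0) 97
    decide (control = (PySem.Int.ofChars? (PySem.List.slice iban.toList (some 2) (some 4))).getD 0)

-- ===== PORT B =====
-- `int(d)` on a single character is PySem.Int.ofChars? [d]; Pre_ guarantees it parses (a digit)
def control_iban_alt (iban : String) : Bool :=
  if PySem.List.slice iban.toList none (some 2) ≠ "BY".toList then true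
  else
    let step := fun (r : Int) (d : Char) =>
      PySem.Int.mod (r * 10 + (PySem.Int.ofChars? [d]).getD 0) 97
    let rem1 := (PySem.List.slice iban.toList (some 4) none).foldl
      (fun r c =>
        (if 65 ≤ (c.toNat : Int) then PySem.Int.toChars ((c.toNat : Int) - 55) else [c]).foldl step r) 0
    let rem := "113400".toList.foldl step rem1
    decide (98 - rem = (PySem.Int.ofChars? (PySem.List.slice iban.toList (some 2) (some 4))).getD 0)

-- ===== PRECONDITION & SPEC =====
-- Pre_ excludes exactly (a) "BY" inputs whose body makes `int()` raise ValueError — a non-digit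
-- check-digit slice, a body character below code 65 that is not a digit (B's per-digit int()
-- raises there too; A's single int() accidentally still returns when the stray character is a
-- space/sign that its lenient parsing tolerates at the front — see cites), and (b) "BY" inputs
-- whose digit expansion exceeds CPython's 4300-digit int() conversion limit, where A raises
-- ValueError (B, which never builds the big integer, still returns there).
def Pre_control_iban (iban : String) : Prop :=
  PySem.List.slice iban.toList none (some 2) ≠ "BY".toList ∨
  (((iban.toList.drop 4).all (fun c => PySem.Chars.isdigit c || decide (65 ≤ c.toNat)) = true) ∧
   (PySem.Int.ofChars? (PySem.List.slice iban.toList (some 2) (some 4))).isSome = true ∧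
   (iban.toList.drop 4).length + (iban.toList.drop 4).countP (fun c => 65 ≤ c.toNat) + 6 ≤ 4300)
instance (iban : String) : Decidable (Pre_control_iban iban) := by
  unfold Pre_control_iban; infer_instance

def pvWitness_control_iban : String := "BY00"

def Spec_control_iban (iban : String) (out : Bool) : Prop := out = control_iban_alt iban
instance (iban : String) (out : Bool) : Decidable (Spec_control_iban iban out) := by unfold Spec_control_iban; infer_instance

-- ===== CLAIM (what is proved, stated in full; the proofs are below) =====
def Claim_equal_control_iban : Prop := ∀ (iban : String), Dom_control_iban iban → Pre_control_iban iban → Spec_control_iban iban (control_iban iban)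

-- ===== LEMMAS AND PROOFS =====

-- the value `int(d)` of a single digit character
lemma pvDigitVal (c : Char) (h : PySem.Chars.isdigit c = true) :
    (PySem.Int.ofChars? [c]).getD 0 = (c.toNat : Int) - 48 := by
  simp only [PySem.Chars.isdigit, Bool.and_eq_true, decide_eq_true_eq] at h
  have key : ∀ n : ℕ, n < 58 → 48 ≤ n →
      (PySem.Int.ofChars? [Char.ofNat n]).getD 0 = (n : Int) - 48 := by decide
  have h48 : 48 ≤ c.toNat := Fin.mk_le_mk.mp h.1
  have h57 : c.toNat ≤ 57 := Fin.mk_le_mk.mp h.2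
  have := key c.toNat (by omega) h48
  rwa [Char.ofNat_toNat c] at this

-- str(code - 55) consists of digits for every printable-ASCII letter-or-above code
lemma pvToCharsDigits (n : ℕ) (h1 : 65 ≤ n) (h2 : n < 127) :
    (PySem.Int.toChars ((n : Int) - 55)).all PySem.Chars.isdigit = true := by
  interval_cases n <;> decide

-- B's rolling-remainder fold computes A's decimal fold mod 97 on digit characters
lemma pvRollEq (ds : List Char) (hd : ds.all PySem.Chars.isdigit = true) : ∀ r : Int,
    ds.foldl (fun r d => PySem.Int.mod (r * 10 + (PySem.Int.ofChars? [d]).getD 0) 97) (r % 97) =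
    (ds.foldl (fun v c => v * 10 + ((c.toNat : Int) - 48)) r) % 97 := by
  induction ds with
  | nil => intro r; simp
  | cons d t ih =>
    intro r
    simp only [List.all_cons, Bool.and_eq_true] at hd
    simp only [List.foldl_cons]
    rw [pvDigitVal d hd.1, PySem.Int.mod_eq_emod_of_pos (by norm_num : (0:Int) < 97)]
    have h1 : (r % 97 * 10 + ((d.toNat : Int) - 48)) % 97
        = (r * 10 + ((d.toNat : Int) - 48)) % 97 :=
      (Int.ModEq.mul_right 10 (Int.emod_emod_of_dvd r dvd_rfl)).add_right _
    rw [h1]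
    exact ih hd.2 _

-- every character of the flattened digit expansion is a digit
lemma pvFlatDigits (acc : List Char)
    (hdom : ∀ c ∈ acc, pvDomChar c = true)
    (hdig : ∀ c ∈ acc, PySem.Chars.isdigit c = true ∨ 65 ≤ c.toNat) :
    ((acc.flatMap (fun c =>
        if 65 ≤ (c.toNat : Int) then PySem.Int.toChars ((c.toNat : Int) - 55) else [c]))
      ++ "113400".toList).all PySem.Chars.isdigit = true := by
  rw [List.all_append]
  refine Bool.and_eq_true_iff.mpr ⟨?_, by decide⟩
  rw [List.all_eq_true]
  intro d hdmem
  rw [List.mem_flatMap] at hdmem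
  obtain ⟨c, hc, hd⟩ := hdmem
  by_cases h65 : 65 ≤ (c.toNat : Int)
  · rw [if_pos h65] at hd
    have h65' : 65 ≤ c.toNat := by exact_mod_cast h65
    have h127 : c.toNat < 127 := by
      have := hdom c hc
      simp only [pvDomChar, Bool.or_eq_true, Bool.and_eq_true, decide_eq_true_eq, beq_iff_eq] at this
      omega
    have := pvToCharsDigits c.toNat h65' h127
    rw [List.all_eq_true] at this
    exact this d hd
  · rw [if_neg h65] at hd
    rcases hdig c hc with h | h
    · simpa [List.mem_singleton.mp hd] using h
    · exact absurd (by exact_mod_cast h : (65:Int) ≤ (c.toNat : Int)) h65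

-- ===== VERDICT (by name: the statement is the Claim_ definition above) =====
theorem control_iban_spec : Claim_equal_control_iban := by
  intro iban hdom hpre
  unfold Spec_control_iban control_iban control_iban_alt
  by_cases hBY : PySem.List.slice iban.toList none (some 2) = "BY".toList
  · rw [if_neg (by simpa using hBY), if_neg (by simpa using hBY)]
    rcases hpre with h | ⟨hdigb, _, _⟩
    · exact absurd hBY h
    have hdig : ∀ c ∈ iban.toList.drop 4, PySem.Chars.isdigit c = true ∨ 65 ≤ c.toNat := by
      intro c hc
      have := (List.all_eq_true.mp hdigb) c hc
      simpa using this
    rw [PySem.List.slice_from iban.toList (by norm_num : (0:Int) ≤ 4),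
        (by decide : ((4:Int)).toNat = 4)]
    have hdom' : ∀ c ∈ iban.toList.drop 4, pvDomChar c = true := by
      intro c hc
      have : c ∈ iban.toList := List.drop_subset _ _ hc
      have h := hdom
      unfold Dom_control_iban pvDomStr at h
      rw [List.all_eq_true] at h
      exact h c this
    have hdig' : ∀ c ∈ iban.toList.drop 4,
        PySem.Chars.isdigit c = true ∨ 65 ≤ c.toNat := by
      intro c hc; exact hdig c (by simpa using hc)
    set acc := iban.toList.drop 4 with hacc
    dsimp only
    -- A's string build flattens
    rw [PySem.List.foldl_append_eq_flatMap
      (fun c => if 65 ≤ (c.toNat : Int) then PySem.Int.toChars ((c.toNat : Int) - 55) else [c])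
      acc []]
    rw [List.nil_append]
    -- B's nested fold is the fold over the flattened expansion
    rw [← List.foldl_flatMap]
    rw [← List.foldl_append]
    -- compare the two remainders
    have hall := pvFlatDigits acc hdom' hdig'
    have hroll := pvRollEq _ hall 0
    rw [show ((0:Int) % 97) = 0 by norm_num] at hroll
    rw [hroll, PySem.Int.mod_eq_emod_of_pos (by norm_num : (0:Int) < 97)]
  · rw [if_pos (by simpa using hBY), if_pos (by simpa using hBY)]
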